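-- pv_equiv track=rewrite | github.com/wyk18703232953/myResearch | codeComplex/data/filteredData/python/logn/python_logn_0127.py | min_splitters
-- ===== SOURCE A (Python) =====
-- def sum_upto(num: int) -> int:
--     # sum of 1..num
--     return (num * (num + 1)) // 2
--
-- def sum_from_to(fromm: int, to: int) -> int:
--     if fromm <= 1:
--         return sum_upto(to)
--     # sum from fromm..to
--     return sum_upto(to) - sum_upto(fromm - 1)
--
-- def min_splitters(n: int, k: int) -> int:
--     start = 1
--     end = k
--     while start < end:
--         mid = (start + end) // 2
--         mid_val = sum_from_to(mid, k)
--         if mid_val == n: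
--             return k - mid + 1
--         elif mid_val > n:
--             start = mid + 1
--         else:
--             end = mid
--     return k - start + 1
-- ===== SOURCE B (Python) =====
-- def sum_upto(num: int) -> int:
--     # sum of 1..num
--     return (num * (num + 1)) // 2
--
--
-- def _isqrt(x: int) -> int:
--     # floor integer square root by Newton's method (x >= 1)
--     r = x
--     while r * r > x:
--         r = (r + x // r) // 2
--     return r
--
--
-- def min_splitters(n: int, k: int) -> int:
--     if k <= 1:
--         return k
--     # least m >= 0 with sum_upto(m) >= need, via the quadratic formula
--     need = sum_upto(k) - n
--     if need <= 0:
--         m = 0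
--     else:
--         s = _isqrt(2 * need)
--         m = s if s * (s + 1) >= 2 * need else s + 1
--     mid = m + 1
--     if mid >= k:
--         return 1
--     return k - mid + 1
-- ===== Notes on version B (the rewrite author's own statement) =====
-- stated objective: alternative
-- what changed: Replaces the binary search over mid with a direct closed-form solution of the quadratic sum inequality: compute need = sum_upto(k) - n and the least m with m(m+1)/2 >= need via a hand-rolled Newton integer square root, then clamp; no search over the predicate remains.
import Mathlib
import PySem

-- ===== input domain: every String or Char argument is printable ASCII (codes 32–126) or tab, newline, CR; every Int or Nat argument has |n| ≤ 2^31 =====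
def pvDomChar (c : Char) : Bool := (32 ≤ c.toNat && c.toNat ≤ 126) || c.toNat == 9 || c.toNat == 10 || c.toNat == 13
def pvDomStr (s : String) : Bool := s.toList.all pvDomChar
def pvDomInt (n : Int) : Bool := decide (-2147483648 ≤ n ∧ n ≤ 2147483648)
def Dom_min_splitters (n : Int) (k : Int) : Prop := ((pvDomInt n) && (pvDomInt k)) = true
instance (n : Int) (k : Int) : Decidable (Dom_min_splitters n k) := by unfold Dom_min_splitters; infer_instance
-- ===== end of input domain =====

-- B replaces A's binary search by a closed-form solution of the quadratic inequality
-- (Newton integer square root); an alternative algorithm of similar cost, no speed claim.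

-- ===== PORT A =====
def sumUpto (num : Int) : Int := PySem.Int.floordiv (num * (num + 1)) 2

def sumFromTo (fromm to_ : Int) : Int :=
  if fromm ≤ 1 then sumUpto to_ else sumUpto to_ - sumUpto (fromm - 1)

def msLoop (n k start stop : Int) : Int :=
  if h : start < stop then
    let mid := PySem.Int.floordiv (start + stop) 2
    let midVal := sumFromTo mid k
    if midVal = n then k - mid + 1
    else if midVal > n then msLoop n k (mid + 1) stop
    else msLoop n k start mid
  else k - start + 1
termination_by (stop - start).toNat
decreasing_by
  · have := PySem.Int.floordiv_two_mid_bounds (le_of_lt h)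
    have hlt : PySem.Int.floordiv (start + stop) 2 < stop := by
      rw [PySem.Int.floordiv_lt_iff_lt_mul (by norm_num)]; omega
    omega
  · have := PySem.Int.floordiv_two_mid_bounds (le_of_lt h)
    have hlt : PySem.Int.floordiv (start + stop) 2 < stop := by
      rw [PySem.Int.floordiv_lt_iff_lt_mul (by norm_num)]; omega
    omega

def min_splitters (n : Int) (k : Int) : Int := msLoop n k 1 k

-- ===== PORT B =====
-- Newton's iteration for the floor square root; the `r ≤ 0` guard only makes the
-- recursion total (B's Python only ever reaches this loop with r ≥ 1).
def isqrtLoop (x r : Int) : Int :=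
  if _h0 : r ≤ 0 then r
  else if _h : r * r > x then
    isqrtLoop x (PySem.Int.floordiv (r + PySem.Int.floordiv x r) 2)
  else r
termination_by r.toNat
decreasing_by
  have hr : 0 < r := by omega
  have hq : PySem.Int.floordiv x r < r := by
    rw [PySem.Int.floordiv_lt_iff_lt_mul hr]; nlinarith
  have hlt : PySem.Int.floordiv (r + PySem.Int.floordiv x r) 2 < r := by
    rw [PySem.Int.floordiv_lt_iff_lt_mul (by norm_num)]; omega
  omega

def isqrtB (x : Int) : Int := isqrtLoop x x

def min_splitters_alt (n : Int) (k : Int) : Int :=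
  if k ≤ 1 then k
  else
    let need := sumUpto k - n
    let m : Int :=
      if need ≤ 0 then 0
      else
        let s := isqrtB (2 * need)
        if s * (s + 1) ≥ 2 * need then s else s + 1
    let mid := m + 1
    if mid ≥ k then 1 else k - mid + 1

-- ===== PRECONDITION & SPEC =====
def Spec_min_splitters (n : Int) (k : Int) (out : Int) : Prop := out = min_splitters_alt n k
instance (n : Int) (k : Int) (out : Int) : Decidable (Spec_min_splitters n k out) := by unfold Spec_min_splitters; infer_instance

-- ===== CLAIM (what is proved, stated in full; the proofs are below) =====
def Claim_equal_min_splitters : Prop := ∀ (n : Int) (k : Int), Dom_min_splitters n k → Spec_min_splitters n k (min_splitters n k)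

-- ===== LEMMAS AND PROOFS =====

theorem two_mul_sumUpto (m : Int) : 2 * sumUpto m = m * (m + 1) := by
  unfold sumUpto
  rw [PySem.Int.floordiv_eq_ediv_of_pos (by norm_num)]
  exact Int.mul_ediv_cancel' (Int.even_mul_succ_self m).two_dvd

theorem sumUpto_strictMono {a b : Int} (ha : 0 ≤ a) (hab : a < b) : sumUpto a < sumUpto b := by
  have h1 := two_mul_sumUpto a
  have h2 := two_mul_sumUpto b
  nlinarith

theorem sumFromTo_eq {a : Int} (ha : 1 ≤ a) (k : Int) :
    sumFromTo a k = sumUpto k - sumUpto (a - 1) := by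
  unfold sumFromTo
  rcases lt_or_ge 1 a with h | h
  · rw [if_neg (by omega)]
  · have : a = 1 := le_antisymm h ha
    subst this
    have h0 : sumUpto 0 = 0 := by decide
    simp [h0]

theorem sumFromTo_strict {a b : Int} (ha : 1 ≤ a) (hab : a < b) (k : Int) :
    sumFromTo b k < sumFromTo a k := by
  rw [sumFromTo_eq ha, sumFromTo_eq (by omega)]
  have := sumUpto_strictMono (a := a - 1) (b := b - 1) (by omega) (by omega)
  omega

-- `pred n k j` : the lower-bound predicate both programs locate the least index of.
def pred (n k j : Int) : Prop := sumFromTo j k ≤ n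

theorem pred_mono {n k a b : Int} (ha : 1 ≤ a) (hab : a ≤ b) (h : pred n k a) : pred n k b := by
  unfold pred at *
  rcases eq_or_lt_of_le hab with rfl | hlt
  · exact h
  · have := sumFromTo_strict ha hlt k
    omega

-- A's binary search returns k - m + 1 for the clamped least index m of `pred`.
theorem msLoop_eq (n k : Int) (m : Int)
    (hmk : pred n k m ∨ m = k)
    (hmin : ∀ j, 1 ≤ j → j < m → ¬ pred n k j) :
    ∀ start stop, 1 ≤ start → start ≤ m → m ≤ stop → stop ≤ k →
      msLoop n k start stop = k - m + 1 := by
  intro start stop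
  generalize hN : (stop - start).toNat = N
  induction N using Nat.strong_induction_on generalizing start stop with
  | _ N ih =>
    intro h1 h2 h3 h4
    by_cases h : start < stop
    · have hmb := PySem.Int.floordiv_two_mid_bounds (le_of_lt h)
      set mid := PySem.Int.floordiv (start + stop) 2 with hmiddef
      have hmidlt : mid < stop := by
        rw [hmiddef, PySem.Int.floordiv_lt_iff_lt_mul (by norm_num)]; omega
      have hmid1 : 1 ≤ mid := by omega
      rw [msLoop, dif_pos h]
      simp only [← hmiddef, gt_iff_lt]
      by_cases he : sumFromTo mid k = n
      · rw [if_pos he]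
        have hpm : pred n k mid := by unfold pred; omega
        have h6 : ¬ mid < m := fun hc => hmin mid hmid1 hc hpm
        have h7 : ¬ m < mid := by
          intro hc
          rcases hmk with hp | rfl
          · have := sumFromTo_strict (a := m) (b := mid) (by omega) hc k
            unfold pred at hp
            omega
          · omega
        omega
      · rw [if_neg he]
        by_cases hg : n < sumFromTo mid k
        · rw [if_pos hg]
          have hstep : mid + 1 ≤ m := by
            by_contra hc
            rcases hmk with hp | rfl
            · have : pred n k mid := pred_mono (by omega) (by omega) hp
              unfold pred at this; omega
            · omega
          exact ih (stop - (mid + 1)).toNat (by omega) (mid + 1) stop rfl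
            (by omega) hstep h3 h4
        · rw [if_neg hg]
          have hpm : pred n k mid := by unfold pred; omega
          have hmle : m ≤ mid := by
            by_contra hc
            exact hmin mid hmid1 (by omega) hpm
          exact ih (mid - start).toNat (by omega) start mid rfl h1 h2 hmle (by omega)
    · rw [msLoop, dif_neg h]
      omega

-- Characterization of Int.sqrt for nonnegative arguments.
theorem int_sqrt_facts (x : Int) (hx : 0 ≤ x) :
    Int.sqrt x * Int.sqrt x ≤ x ∧ x < (Int.sqrt x + 1) * (Int.sqrt x + 1) ∧ 0 ≤ Int.sqrt x := by
  unfold Int.sqrt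
  have h1 := Nat.sqrt_le' x.toNat
  have h2 := Nat.lt_succ_sqrt' x.toNat
  have hxt : (x.toNat : Int) = x := Int.toNat_of_nonneg hx
  zify at h1 h2
  rw [hxt] at h1 h2
  exact ⟨by nlinarith, by nlinarith, by positivity⟩

-- Newton's loop returns Int.sqrt once started at or above it.
theorem isqrtLoop_eq (x : Int) (hx : 1 ≤ x) :
    ∀ r, Int.sqrt x ≤ r → isqrtLoop x r = Int.sqrt x := by
  obtain ⟨hs1, hs2, hs0⟩ := int_sqrt_facts x (by omega)
  have hspos : 1 ≤ Int.sqrt x := by nlinarith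
  intro r
  generalize hN : r.toNat = N
  induction N using Nat.strong_induction_on generalizing r with
  | _ N ih =>
    intro hr
    have hrpos : 0 < r := by omega
    rw [isqrtLoop, dif_neg (by omega)]
    by_cases h : x < r * r
    · rw [dif_pos h]
      -- bounds for q = x // r and t = (r + q) // 2
      set q := PySem.Int.floordiv x r with hqdef
      have hq : q * r ≤ x ∧ x < (q + 1) * r := by
        rw [hqdef, ← PySem.Int.floordiv_eq_iff_of_pos hrpos]
      have hqr : q < r := by nlinarith [hq.1, hq.2]
      have hq0 : 0 ≤ q := by nlinarith [hq.1, hq.2]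
      set t := PySem.Int.floordiv (r + q) 2 with htdef
      have ht : t * 2 ≤ r + q ∧ r + q < (t + 1) * 2 := by
        rw [htdef, ← PySem.Int.floordiv_eq_iff_of_pos (by norm_num)]
      have htr : t < r := by omega
      -- AM-GM: (t+1)^2 > x, hence sqrt x ≤ t
      have hamgm : x < (t + 1) * (t + 1) := by nlinarith [sq_nonneg (r - q - 1), hq.2, ht.1]
      have hst : Int.sqrt x ≤ t := by nlinarith [hamgm, hs1]
      exact ih t.toNat (by omega) t rfl hst
    · rw [dif_neg h]
      have : r ≤ Int.sqrt x := by nlinarith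
      omega

theorem isqrtB_eq (x : Int) (hx : 1 ≤ x) : isqrtB x = Int.sqrt x := by
  obtain ⟨hs1, _, hs0⟩ := int_sqrt_facts x (by omega)
  exact isqrtLoop_eq x hx x (by nlinarith)

-- B's closed form also returns k - m + 1 for the clamped least index m.
theorem alt_eq (n k : Int) (m : Int)
    (hmk : pred n k m ∨ m = k)
    (hmin : ∀ j, 1 ≤ j → j < m → ¬ pred n k j)
    (h1 : 1 ≤ m) (h2 : m ≤ k) (hk : 1 < k) :
    min_splitters_alt n k = k - m + 1 := by
  unfold min_splitters_alt
  rw [if_neg (by omega)]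
  simp only []
  set need := sumUpto k - n with hneed
  set m' : Int := if need ≤ 0 then 0 else
      if isqrtB (2 * need) * (isqrtB (2 * need) + 1) ≥ 2 * need then isqrtB (2 * need)
      else isqrtB (2 * need) + 1 with hm'def
  -- m' is the least p ≥ 0 with sumUpto p ≥ need
  have hm'prop : 0 ≤ m' ∧ need ≤ sumUpto m' ∧ ∀ p, 0 ≤ p → p < m' → sumUpto p < need := by
    rw [hm'def]
    by_cases h0 : need ≤ 0
    · rw [if_pos h0]
      have : sumUpto 0 = 0 := by decide
      exact ⟨le_rfl, by omega, fun p hp hp' => absurd hp' (by omega)⟩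
    · rw [if_neg h0]
      have h2n : 1 ≤ 2 * need := by omega
      rw [isqrtB_eq _ h2n]
      obtain ⟨hs1, hs2, hs0⟩ := int_sqrt_facts (2 * need) (by omega)
      set s := Int.sqrt (2 * need) with hsdef
      by_cases hcase : s * (s + 1) ≥ 2 * need
      · rw [if_pos hcase]
        refine ⟨hs0, by have := two_mul_sumUpto s; omega, fun p hp hps => ?_⟩
        have hmul : p * (p + 1) ≤ (s - 1) * s := by nlinarith
        have := two_mul_sumUpto p
        nlinarith
      · rw [if_neg hcase]
        refine ⟨by omega, ?_, fun p hp hps => ?_⟩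
        · have h' : 2 * need ≤ (s + 1) * (s + 1 + 1) := by nlinarith
          have := two_mul_sumUpto (s + 1)
          omega
        · have hmul : p * (p + 1) ≤ s * (s + 1) := by nlinarith
          have := two_mul_sumUpto p
          omega
  obtain ⟨hm'0, hm'ge, hm'min⟩ := hm'prop
  -- m' + 1 is the unclamped least index of pred
  have hpred : pred n k (m' + 1) := by
    unfold pred
    rw [sumFromTo_eq (by omega)]
    have hmm : m' + 1 - 1 = m' := by ring
    rw [hmm]
    omega
  have hpredmin : ∀ j, 1 ≤ j → j < m' + 1 → ¬ pred n k j := by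
    intro j hj hjm
    unfold pred
    rw [sumFromTo_eq hj]
    have := hm'min (j - 1) (by omega) (by omega)
    omega
  by_cases hc : m' + 1 ≥ k
  · rw [if_pos hc]
    -- m = k here
    have : m = k := by
      rcases hmk with hp | rfl
      · by_contra hne
        exact hpredmin m h1 (by omega) hp
      · rfl
    omega
  · rw [if_neg hc]
    -- m = m' + 1 here
    have hge : ¬ m' + 1 < m := fun hc' => hmin (m' + 1) (by omega) hc' hpred
    have hle : ¬ m < m' + 1 := by
      intro hc'
      rcases hmk with hp | rfl
      · exact hpredmin m h1 hc' hp
      · omega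
    omega

-- the clamped least index of `pred` exists for k ≥ 2
theorem exists_m (n k : Int) (hk : 1 < k) :
    ∃ m, (pred n k m ∨ m = k) ∧ (∀ j, 1 ≤ j → j < m → ¬ pred n k j) ∧ 1 ≤ m ∧ m ≤ k := by
  letI : DecidablePred (fun t : Nat => pred n k (1 + (t : Int)) ∨ 1 + (t : Int) = k) :=
    fun _ => Classical.dec _
  have hQ : ∃ t : Nat, pred n k (1 + (t : Int)) ∨ 1 + (t : Int) = k :=
    ⟨(k - 1).toNat, Or.inr (by omega)⟩
  have hfind := Nat.find_spec hQ
  refine ⟨1 + (Nat.find hQ : Int), hfind, ?_, by omega, ?_⟩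
  · intro j hj hjm hp
    have ht : ((j - 1).toNat : Int) = j - 1 := by omega
    have := Nat.find_min hQ (m := (j - 1).toNat) (by omega)
    push Not at this
    have h1 : pred n k (1 + ((j - 1).toNat : Int)) := by rw [ht]; simpa using hp
    exact this.1 h1
  · have := Nat.find_min' hQ (m := (k - 1).toNat) (Or.inr (by omega))
    omega

-- ===== VERDICT (by name: the statement is the Claim_ definition above) =====
theorem min_splitters_spec : Claim_equal_min_splitters := by
  intro n k _
  unfold Spec_min_splitters min_splitters
  by_cases hk : 1 < k
  · obtain ⟨m, hmk, hmin, h1, h2⟩ := exists_m n k hk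
    rw [msLoop_eq n k m hmk hmin 1 k le_rfl h1 h2 le_rfl,
        alt_eq n k m hmk hmin h1 h2 hk]
  · rw [msLoop, dif_neg (by omega)]
    unfold min_splitters_alt
    rw [if_pos (by omega)]
    omega
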